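-- pv_equiv track=rewrite | github.com/LeiterConsulting/splunk-discovery-tool | src/discovery/local_analyzer.py | _identify_platform
-- ===== SOURCE A (Python) =====
-- def _identify_platform(sourcetype_name: str) -> str:
--     """Identify platform from sourcetype name with comprehensive pattern matching."""
--     st_lower = sourcetype_name.lower()
--
--     # Windows platform indicators
--     if any(pattern in st_lower for pattern in ['wineventlog', 'windows', 'win:', 'perfmon', 'msad:', 'ms:', 'iis', 'mssql']):
--         return "Windows"
--
--     # Unix/Linux platform indicators
--     elif any(pattern in st_lower for pattern in ['unix:', 'linux', 'syslog', 'linux_', 'bash', 'sh_history', 'secure.log', 'messages.log', 'apt_', 'yum_', 'dpkg']):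
--         return "Unix/Linux"
--
--     # Network device indicators
--     elif any(pattern in st_lower for pattern in ['network', 'firewall', 'cisco', 'juniper', 'palo alto', 'fortinet', 'f5', 'netflow', 'router', 'switch', 'vpn']):
--         return "Network"
--
--     # Cloud platform indicators
--     elif any(pattern in st_lower for pattern in ['cloud', 'aws', 'azure', 'gcp', 'cloudtrail', 's3:', 'ec2:', 'lambda']):
--         return "Cloud"
--
--     # Database indicators
--     elif any(pattern in st_lower for pattern in ['database', 'sql', 'oracle', 'mysql', 'postgres', 'mongodb', 'db2', 'cassandra']):
--         return "Database"
--
--     # Web server indicators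
--     elif any(pattern in st_lower for pattern in ['access_combined', 'access_', 'apache', 'nginx', 'tomcat', 'weblogic']):
--         return "Web Server"
--
--     # Application indicators
--     elif any(pattern in st_lower for pattern in ['application', 'app:', 'app_']):
--         return "Application"
--
--     # Performance/metrics indicators
--     elif any(pattern in st_lower for pattern in ['cpu', 'memory', 'disk', 'interfaces', 'uptime', 'vmstat', 'iostat', 'netstat']):
--         return "System Metrics"
--
--     else:
--         return "Application"  # Default fallback
-- ===== SOURCE B (Python) =====
-- # B: instead of an if/elif chain over pattern groups, map every pattern to a
-- # numeric priority, take the MINIMUM priority among all patterns occurring in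
-- # the lowered name, and look the label up by that index (default = last slot).
-- _PATTERN_PRIORITY = {
--     'wineventlog': 0, 'windows': 0, 'win:': 0, 'perfmon': 0, 'msad:': 0, 'ms:': 0, 'iis': 0, 'mssql': 0,
--     'unix:': 1, 'linux': 1, 'syslog': 1, 'linux_': 1, 'bash': 1, 'sh_history': 1, 'secure.log': 1,
--     'messages.log': 1, 'apt_': 1, 'yum_': 1, 'dpkg': 1,
--     'network': 2, 'firewall': 2, 'cisco': 2, 'juniper': 2, 'palo alto': 2, 'fortinet': 2, 'f5': 2,
--     'netflow': 2, 'router': 2, 'switch': 2, 'vpn': 2,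
--     'cloud': 3, 'aws': 3, 'azure': 3, 'gcp': 3, 'cloudtrail': 3, 's3:': 3, 'ec2:': 3, 'lambda': 3,
--     'database': 4, 'sql': 4, 'oracle': 4, 'mysql': 4, 'postgres': 4, 'mongodb': 4, 'db2': 4, 'cassandra': 4,
--     'access_combined': 5, 'access_': 5, 'apache': 5, 'nginx': 5, 'tomcat': 5, 'weblogic': 5,
--     'application': 6, 'app:': 6, 'app_': 6,
--     'cpu': 7, 'memory': 7, 'disk': 7, 'interfaces': 7, 'uptime': 7, 'vmstat': 7, 'iostat': 7, 'netstat': 7,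
-- }
-- _LABELS = ["Windows", "Unix/Linux", "Network", "Cloud", "Database",
--            "Web Server", "Application", "System Metrics", "Application"]
--
-- def _identify_platform(sourcetype_name: str) -> str:
--     st_lower = sourcetype_name.lower()
--     best = min((prio for pat, prio in _PATTERN_PRIORITY.items() if pat in st_lower),
--                default=len(_LABELS) - 1)
--     return _LABELS[best]
-- ===== Notes on version B (the rewrite author's own statement) =====
-- stated objective: alternative
-- what changed: Replaces the sequential if/elif chain over pattern groups with a flat pattern-to-priority map: B computes the minimum priority among ALL matched patterns (no groups, no early exit) and indexes a label table with it, the default being the last slot.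
import Mathlib
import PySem

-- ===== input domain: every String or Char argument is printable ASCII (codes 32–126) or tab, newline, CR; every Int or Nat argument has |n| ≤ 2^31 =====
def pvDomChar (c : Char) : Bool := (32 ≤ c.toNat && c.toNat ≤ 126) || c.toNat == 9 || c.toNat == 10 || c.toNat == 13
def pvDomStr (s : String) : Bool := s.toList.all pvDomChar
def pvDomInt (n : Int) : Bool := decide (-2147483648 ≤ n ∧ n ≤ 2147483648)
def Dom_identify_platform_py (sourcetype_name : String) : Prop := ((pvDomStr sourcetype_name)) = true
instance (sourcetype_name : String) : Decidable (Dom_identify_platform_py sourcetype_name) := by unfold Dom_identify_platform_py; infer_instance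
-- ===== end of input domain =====

-- B replaces the if/elif chain by a pattern→priority map: the result is the label at
-- the minimum priority among all matched patterns (objective: alternative decomposition).


-- ===== PORT A =====
-- literal port of the if/elif chain; 'pattern in st_lower' = PySem.Str.isIn
def identify_platform_py (sourcetype_name : String) : String :=
  let st_lower := PySem.Str.lower sourcetype_name
  if ["wineventlog", "windows", "win:", "perfmon", "msad:", "ms:", "iis", "mssql"].any
      (fun pattern => PySem.Str.isIn pattern st_lower) then "Windows"
  else if ["unix:", "linux", "syslog", "linux_", "bash", "sh_history", "secure.log", "messages.log", "apt_", "yum_", "dpkg"].any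
      (fun pattern => PySem.Str.isIn pattern st_lower) then "Unix/Linux"
  else if ["network", "firewall", "cisco", "juniper", "palo alto", "fortinet", "f5", "netflow", "router", "switch", "vpn"].any
      (fun pattern => PySem.Str.isIn pattern st_lower) then "Network"
  else if ["cloud", "aws", "azure", "gcp", "cloudtrail", "s3:", "ec2:", "lambda"].any
      (fun pattern => PySem.Str.isIn pattern st_lower) then "Cloud"
  else if ["database", "sql", "oracle", "mysql", "postgres", "mongodb", "db2", "cassandra"].any
      (fun pattern => PySem.Str.isIn pattern st_lower) then "Database"
  else if ["access_combined", "access_", "apache", "nginx", "tomcat", "weblogic"].any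
      (fun pattern => PySem.Str.isIn pattern st_lower) then "Web Server"
  else if ["application", "app:", "app_"].any
      (fun pattern => PySem.Str.isIn pattern st_lower) then "Application"
  else if ["cpu", "memory", "disk", "interfaces", "uptime", "vmstat", "iostat", "netstat"].any
      (fun pattern => PySem.Str.isIn pattern st_lower) then "System Metrics"
  else "Application"

-- ===== PORT B =====
-- _PATTERN_PRIORITY dict (63 distinct keys, insertion order) as an association list
def pvPatternPriority : List (String × Nat) :=
  [("wineventlog", 0), ("windows", 0), ("win:", 0), ("perfmon", 0), ("msad:", 0), ("ms:", 0), ("iis", 0), ("mssql", 0),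
   ("unix:", 1), ("linux", 1), ("syslog", 1), ("linux_", 1), ("bash", 1), ("sh_history", 1), ("secure.log", 1),
   ("messages.log", 1), ("apt_", 1), ("yum_", 1), ("dpkg", 1),
   ("network", 2), ("firewall", 2), ("cisco", 2), ("juniper", 2), ("palo alto", 2), ("fortinet", 2), ("f5", 2),
   ("netflow", 2), ("router", 2), ("switch", 2), ("vpn", 2),
   ("cloud", 3), ("aws", 3), ("azure", 3), ("gcp", 3), ("cloudtrail", 3), ("s3:", 3), ("ec2:", 3), ("lambda", 3),
   ("database", 4), ("sql", 4), ("oracle", 4), ("mysql", 4), ("postgres", 4), ("mongodb", 4), ("db2", 4), ("cassandra", 4),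
   ("access_combined", 5), ("access_", 5), ("apache", 5), ("nginx", 5), ("tomcat", 5), ("weblogic", 5),
   ("application", 6), ("app:", 6), ("app_", 6),
   ("cpu", 7), ("memory", 7), ("disk", 7), ("interfaces", 7), ("uptime", 7), ("vmstat", 7), ("iostat", 7), ("netstat", 7)]

def pvLabels : List String :=
  ["Windows", "Unix/Linux", "Network", "Cloud", "Database", "Web Server", "Application", "System Metrics", "Application"]

-- min(gen, default=8) ported as the fold computing the minimum of the filtered priorities;
-- _LABELS[best] ported with getD: best ≤ 8 always (fold only lowers the start 8), so exact.
def identify_platform_py_alt (sourcetype_name : String) : String :=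
  let st_lower := PySem.Str.lower sourcetype_name
  let best := pvPatternPriority.foldl
    (fun b pp => if PySem.Str.isIn pp.1 st_lower then min pp.2 b else b) (pvLabels.length - 1)
  pvLabels.getD best "Application"

-- ===== PRECONDITION & SPEC =====
def Spec_identify_platform_py (sourcetype_name : String) (out : String) : Prop := out = identify_platform_py_alt sourcetype_name
instance (sourcetype_name : String) (out : String) : Decidable (Spec_identify_platform_py sourcetype_name out) := by unfold Spec_identify_platform_py; infer_instance

-- ===== CLAIM =====
def Claim_equal_identify_platform_py : Prop := ∀ (sourcetype_name : String), Dom_identify_platform_py sourcetype_name → Spec_identify_platform_py sourcetype_name (identify_platform_py sourcetype_name)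

-- ===== LEMMAS AND PROOFS =====

-- the eight pattern groups of A, by priority index (proof-only helper)
def pvGroup : Nat → List String
  | 0 => ["wineventlog", "windows", "win:", "perfmon", "msad:", "ms:", "iis", "mssql"]
  | 1 => ["unix:", "linux", "syslog", "linux_", "bash", "sh_history", "secure.log", "messages.log", "apt_", "yum_", "dpkg"]
  | 2 => ["network", "firewall", "cisco", "juniper", "palo alto", "fortinet", "f5", "netflow", "router", "switch", "vpn"]
  | 3 => ["cloud", "aws", "azure", "gcp", "cloudtrail", "s3:", "ec2:", "lambda"]
  | 4 => ["database", "sql", "oracle", "mysql", "postgres", "mongodb", "db2", "cassandra"]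
  | 5 => ["access_combined", "access_", "apache", "nginx", "tomcat", "weblogic"]
  | 6 => ["application", "app:", "app_"]
  | 7 => ["cpu", "memory", "disk", "interfaces", "uptime", "vmstat", "iostat", "netstat"]
  | _ => []

-- every table entry has priority ≤ 7 and its pattern sits in that priority's group
theorem pvFlat_sound : ∀ pp ∈ pvPatternPriority, pp.2 ≤ 7 ∧ pp.1 ∈ pvGroup pp.2 := by decide

-- every group member appears in the table with that priority
theorem pvGroup_mem_flat : ∀ k, k ≤ 7 → ∀ p ∈ pvGroup k, (p, k) ∈ pvPatternPriority := by
  intro k hk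
  interval_cases k <;> decide

-- the min-fold only lowers its accumulator
theorem pvFold_le (c : String → Bool) :
    ∀ (L : List (String × Nat)) (b : Nat),
      L.foldl (fun b pp => if c pp.1 then min pp.2 b else b) b ≤ b := by
  intro L
  induction L with
  | nil => intro b; simp
  | cons pp rest ih =>
      intro b
      simp only [List.foldl_cons]
      split
      · exact le_trans (ih _) (min_le_right _ _)
      · exact ih b

-- the fold is ≤ any matched priority in the list
theorem pvFold_le_matched (c : String → Bool) :
    ∀ (L : List (String × Nat)) (b : Nat) (pp : String × Nat),
      pp ∈ L → c pp.1 = true →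
      L.foldl (fun b pp => if c pp.1 then min pp.2 b else b) b ≤ pp.2 := by
  intro L
  induction L with
  | nil => intro b pp h; simp at h
  | cons q rest ih =>
      intro b pp hmem hc
      simp only [List.foldl_cons]
      rcases List.mem_cons.1 hmem with h | h
      · subst h
        rw [hc]
        exact le_trans (pvFold_le c rest _) (min_le_left _ _)
      · exact ih _ pp h hc

-- the fold result is the start or a matched priority
theorem pvFold_cases (c : String → Bool) :
    ∀ (L : List (String × Nat)) (b : Nat),
      L.foldl (fun b pp => if c pp.1 then min pp.2 b else b) b = b ∨
      ∃ pp ∈ L, c pp.1 = true ∧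
        L.foldl (fun b pp => if c pp.1 then min pp.2 b else b) b = pp.2 := by
  intro L
  induction L with
  | nil => intro b; left; rfl
  | cons q rest ih =>
      intro b
      simp only [List.foldl_cons]
      by_cases hc : c q.1 = true
      · rw [hc]; simp only [if_true]
        rcases ih (min q.2 b) with h | ⟨pp, hm, hcp, he⟩
        · rcases le_total q.2 b with hle | hle
          · right; exact ⟨q, List.mem_cons_self .., hc, by rw [h, min_eq_left hle]⟩
          · left; rw [h, min_eq_right hle]
        · right; exact ⟨pp, List.mem_cons_of_mem _ hm, hcp, he⟩
      · rw [if_neg (by simpa using hc)]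
        rcases ih b with h | ⟨pp, hm, hcp, he⟩
        · left; exact h
        · right; exact ⟨pp, List.mem_cons_of_mem _ hm, hcp, he⟩

-- abbreviation for the fold over the whole table
def pvBest (c : String → Bool) : Nat :=
  pvPatternPriority.foldl (fun b pp => if c pp.1 then min pp.2 b else b) 8

-- a failed `any` makes every member fail
theorem pvAny_false {c : String → Bool} {l : List String} (h : ¬ l.any c = true) :
    ∀ p ∈ l, c p = false := by
  intro p hp
  rcases Bool.eq_false_or_eq_true (c p) with ht | hf
  · exact absurd (List.any_eq_true.mpr ⟨p, hp, ht⟩) h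
  · exact hf

-- if group k is the first matched group, the fold computes k
theorem pvBest_eq_first (c : String → Bool) (k : Nat) (hk : k ≤ 7)
    (hG : ∃ p ∈ pvGroup k, c p = true)
    (hlt : ∀ j, j < k → ∀ p ∈ pvGroup j, c p = false) :
    pvBest c = k := by
  obtain ⟨p, hp, hcp⟩ := hG
  have hle : pvBest c ≤ k :=
    pvFold_le_matched c pvPatternPriority 8 (p, k) (pvGroup_mem_flat k hk p hp) hcp
  rcases pvFold_cases c pvPatternPriority 8 with h | ⟨pp, hm, hcp', he⟩
  · exfalso
    have h8 : pvBest c = 8 := h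
    omega
  · have hs := pvFlat_sound pp hm
    have hge : ¬ pp.2 < k := by
      intro hlt'
      have hf := hlt pp.2 hlt' pp.1 hs.2
      rw [hf] at hcp'
      exact Bool.noConfusion hcp'
    have hbe : pvBest c = pp.2 := he
    omega

-- if no group matches, the fold stays at the default 8
theorem pvBest_eq_default (c : String → Bool)
    (h : ∀ j, j ≤ 7 → ∀ p ∈ pvGroup j, c p = false) :
    pvBest c = 8 := by
  rcases pvFold_cases c pvPatternPriority 8 with hh | ⟨pp, hm, hcp', _⟩
  · exact hh
  · exfalso
    have hs := pvFlat_sound pp hm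
    have hf := h pp.2 hs.1 pp.1 hs.2
    rw [hf] at hcp'
    exact Bool.noConfusion hcp'

-- the if/elif chain equals label-at-minimum-priority, for any match predicate c
theorem pvChain (c : String → Bool) :
    (if ((pvGroup 0).any c) = true then "Windows"
     else if ((pvGroup 1).any c) = true then "Unix/Linux"
     else if ((pvGroup 2).any c) = true then "Network"
     else if ((pvGroup 3).any c) = true then "Cloud"
     else if ((pvGroup 4).any c) = true then "Database"
     else if ((pvGroup 5).any c) = true then "Web Server"
     else if ((pvGroup 6).any c) = true then "Application"
     else if ((pvGroup 7).any c) = true then "System Metrics"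
     else "Application")
    = pvLabels.getD (pvBest c) "Application" := by
  by_cases h0 : (pvGroup 0).any c = true
  · rw [if_pos h0, pvBest_eq_first c 0 (by omega) (List.any_eq_true.mp h0) (by omega)]; rfl
  · by_cases h1 : (pvGroup 1).any c = true
    · rw [if_neg h0, if_pos h1,
        pvBest_eq_first c 1 (by omega) (List.any_eq_true.mp h1)
          (by intro j hj p hp; interval_cases j; exact pvAny_false h0 p hp)]; rfl
    · by_cases h2 : (pvGroup 2).any c = true
      · rw [if_neg h0, if_neg h1, if_pos h2,
          pvBest_eq_first c 2 (by omega) (List.any_eq_true.mp h2)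
            (by intro j hj p hp; interval_cases j
                · exact pvAny_false h0 p hp
                · exact pvAny_false h1 p hp)]; rfl
      · by_cases h3 : (pvGroup 3).any c = true
        · rw [if_neg h0, if_neg h1, if_neg h2, if_pos h3,
            pvBest_eq_first c 3 (by omega) (List.any_eq_true.mp h3)
              (by intro j hj p hp; interval_cases j
                  · exact pvAny_false h0 p hp
                  · exact pvAny_false h1 p hp
                  · exact pvAny_false h2 p hp)]; rfl
        · by_cases h4 : (pvGroup 4).any c = true
          · rw [if_neg h0, if_neg h1, if_neg h2, if_neg h3, if_pos h4,
              pvBest_eq_first c 4 (by omega) (List.any_eq_true.mp h4)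
                (by intro j hj p hp; interval_cases j
                    · exact pvAny_false h0 p hp
                    · exact pvAny_false h1 p hp
                    · exact pvAny_false h2 p hp
                    · exact pvAny_false h3 p hp)]; rfl
          · by_cases h5 : (pvGroup 5).any c = true
            · rw [if_neg h0, if_neg h1, if_neg h2, if_neg h3, if_neg h4, if_pos h5,
                pvBest_eq_first c 5 (by omega) (List.any_eq_true.mp h5)
                  (by intro j hj p hp; interval_cases j
                      · exact pvAny_false h0 p hp
                      · exact pvAny_false h1 p hp
                      · exact pvAny_false h2 p hp
                      · exact pvAny_false h3 p hp
                      · exact pvAny_false h4 p hp)]; rfl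
            · by_cases h6 : (pvGroup 6).any c = true
              · rw [if_neg h0, if_neg h1, if_neg h2, if_neg h3, if_neg h4, if_neg h5, if_pos h6,
                  pvBest_eq_first c 6 (by omega) (List.any_eq_true.mp h6)
                    (by intro j hj p hp; interval_cases j
                        · exact pvAny_false h0 p hp
                        · exact pvAny_false h1 p hp
                        · exact pvAny_false h2 p hp
                        · exact pvAny_false h3 p hp
                        · exact pvAny_false h4 p hp
                        · exact pvAny_false h5 p hp)]; rfl
              · by_cases h7 : (pvGroup 7).any c = true
                · rw [if_neg h0, if_neg h1, if_neg h2, if_neg h3, if_neg h4, if_neg h5, if_neg h6,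
                    if_pos h7,
                    pvBest_eq_first c 7 (by omega) (List.any_eq_true.mp h7)
                      (by intro j hj p hp; interval_cases j
                          · exact pvAny_false h0 p hp
                          · exact pvAny_false h1 p hp
                          · exact pvAny_false h2 p hp
                          · exact pvAny_false h3 p hp
                          · exact pvAny_false h4 p hp
                          · exact pvAny_false h5 p hp
                          · exact pvAny_false h6 p hp)]; rfl
                · rw [if_neg h0, if_neg h1, if_neg h2, if_neg h3, if_neg h4, if_neg h5, if_neg h6,
                    if_neg h7,
                    pvBest_eq_default c
                      (by intro j hj p hp; interval_cases j
                          · exact pvAny_false h0 p hp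
                          · exact pvAny_false h1 p hp
                          · exact pvAny_false h2 p hp
                          · exact pvAny_false h3 p hp
                          · exact pvAny_false h4 p hp
                          · exact pvAny_false h5 p hp
                          · exact pvAny_false h6 p hp
                          · exact pvAny_false h7 p hp)]; rfl

-- ===== VERDICT =====
theorem identify_platform_py_spec : Claim_equal_identify_platform_py := by
  intro s _
  show identify_platform_py s = identify_platform_py_alt s
  have h := pvChain (fun pattern => PySem.Str.isIn pattern (PySem.Str.lower s))
  simpa [identify_platform_py, identify_platform_py_alt, pvGroup, pvBest, pvLabels] using h
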